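-- pv_equiv track=rewrite | github.com/idylle-cynique/atcoder_problems | AtCoder Beginners Contest/ABC189-D.py | pre_logic
-- ===== SOURCE A (Python) =====
-- def pre_logic(t):
--       if len(t) == 0:
--             return 1
--       else:
--             if t[0] == "AND":
--                   return 1 * pre_logic(t[1:])
--             else:
--                   return 2**len(t) + pre_logic(t[1:])
-- ===== SOURCE B (Python) =====
-- def pre_logic(t):
--     n = len(t)
--     acc = 1
--     for i, tok in enumerate(t):
--         if tok != "AND":
--             acc += 1 << (n - i)
--     return acc
-- ===== Notes on version B (the rewrite author's own statement) =====
-- stated objective: faster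
-- what changed: Replaced the recursion with O(n) list slicing and chained bigint power additions by a single indexed pass that adds 1 << (n - i) for each non-AND token into one accumulator.
import Mathlib
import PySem

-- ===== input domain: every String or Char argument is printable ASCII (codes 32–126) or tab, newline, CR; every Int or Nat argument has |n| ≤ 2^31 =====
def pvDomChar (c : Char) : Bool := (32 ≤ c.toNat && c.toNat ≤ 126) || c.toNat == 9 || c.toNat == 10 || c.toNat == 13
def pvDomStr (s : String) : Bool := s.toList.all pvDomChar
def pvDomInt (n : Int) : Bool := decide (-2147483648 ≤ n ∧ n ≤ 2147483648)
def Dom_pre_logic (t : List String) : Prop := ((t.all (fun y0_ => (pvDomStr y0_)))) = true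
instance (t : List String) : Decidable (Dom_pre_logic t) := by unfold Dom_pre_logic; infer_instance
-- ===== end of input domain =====

-- B replaces A's O(n^2) recursion (list slicing + a power per step) by one indexed pass
-- adding 2^(n-i) per non-"AND" token into a single accumulator; return values are equal.

-- ===== PORT A =====
def pre_logic : List String → Int
  | [] => 1
  | x :: xs =>
    if x == "AND" then 1 * pre_logic xs
    else 2 ^ (x :: xs).length + pre_logic xs

-- ===== PORT B =====
-- enumerate(t) with Nat indices; p = (token, index); exponent n - i is exact Nat
-- subtraction since every index i satisfies i < n.
def pre_logic_alt (t : List String) : Int :=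
  t.zipIdx.foldl (fun acc p => if p.1 ≠ "AND" then acc + 2 ^ (t.length - p.2) else acc) 1

-- ===== PRECONDITION & SPEC =====
def Spec_pre_logic (t : List String) (out : Int) : Prop := out = pre_logic_alt t
instance (t : List String) (out : Int) : Decidable (Spec_pre_logic t out) := by unfold Spec_pre_logic; infer_instance

-- ===== CLAIM (what is proved, stated in full; the proofs are below) =====
def Claim_equal_pre_logic : Prop := ∀ (t : List String), Dom_pre_logic t → Spec_pre_logic t (pre_logic t)

-- ===== LEMMAS AND PROOFS =====
theorem pre_logic_fold_aux (n : Nat) :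
    ∀ (xs : List String) (k : Nat) (acc : Int), xs.length + k = n →
      (xs.zipIdx k).foldl
          (fun acc p => if p.1 ≠ "AND" then acc + 2 ^ (n - p.2) else acc) acc
        = acc + (pre_logic xs - 1) := by
  intro xs
  induction xs with
  | nil => intro k acc _; simp [pre_logic]
  | cons x xs ih =>
    intro k acc h
    have hk : xs.length + (k + 1) = n := by simp [List.length_cons] at h; omega
    have hexp : n - k = xs.length + 1 := by simp [List.length_cons] at h; omega
    by_cases hx : x = "AND"
    · simp only [List.zipIdx_cons, List.foldl_cons]
      rw [if_neg (by simp [hx])]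
      rw [ih (k + 1) acc hk]
      simp [pre_logic, hx]
    · simp only [List.zipIdx_cons, List.foldl_cons]
      rw [if_pos (by simpa using hx)]
      rw [ih (k + 1) _ hk]
      simp [pre_logic, hx, hexp]
      push_cast
      ring

-- ===== VERDICT (by name: the statement is the Claim_ definition above) =====
theorem pre_logic_spec : Claim_equal_pre_logic := by
  intro t _
  unfold Spec_pre_logic pre_logic_alt
  rw [show t.zipIdx = t.zipIdx 0 from rfl, pre_logic_fold_aux t.length t 0 1 (by omega)]
  ring
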